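-- pv_equiv track=rewrite | github.com/johnmendez2/github-playground | mcp_slides/tools.py | parse_bold_spans
-- ===== SOURCE A (Python) =====
-- def parse_bold_spans(text: str):
--     spans = []
--     clean_text = ""
--     i = 0
--     while i < len(text):
--         if text[i:i+2] == "**":
--             start = len(clean_text)
--             i += 2
--             while i < len(text) and text[i:i+2] != "**":
--                 clean_text += text[i]
--                 i += 1
--             end = len(clean_text)
--             spans.append((start, end))
--             i += 2
--         else:
--             clean_text += text[i]
--             i += 1
--     return clean_text, spans
-- ===== SOURCE B (Python) =====
-- def parse_bold_spans(text: str):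
--     parts = text.split("**")
--     pieces = []
--     spans = []
--     pos = 0
--     for idx, part in enumerate(parts):
--         if idx % 2 == 1:
--             spans.append((pos, pos + len(part)))
--         pieces.append(part)
--         pos += len(part)
--     return "".join(pieces), spans
-- ===== Notes on version B (the rewrite author's own statement) =====
-- stated objective: faster
-- what changed: replaced the char-by-char index state machine (nested while loops, repeated 2-char slicing, one-char string concatenations) by a single split on the bold marker followed by one pass over the segments with parity deciding which segments are bold spans
import Mathlib
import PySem

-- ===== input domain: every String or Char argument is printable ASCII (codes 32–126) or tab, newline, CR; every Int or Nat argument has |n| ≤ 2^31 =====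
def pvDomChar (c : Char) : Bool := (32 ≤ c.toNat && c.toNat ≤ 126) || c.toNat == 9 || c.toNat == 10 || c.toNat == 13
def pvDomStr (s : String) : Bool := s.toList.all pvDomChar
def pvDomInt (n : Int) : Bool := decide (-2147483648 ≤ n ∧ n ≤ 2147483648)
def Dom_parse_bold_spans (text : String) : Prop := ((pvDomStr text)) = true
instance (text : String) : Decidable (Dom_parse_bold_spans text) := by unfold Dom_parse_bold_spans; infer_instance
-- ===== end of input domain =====

-- B replaces A's char-by-char state machine (with its one-char string concatenations) by one split
-- on the marker plus a single pass over the segments; same value on all inputs, measured faster.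

-- ===== PORT A =====
-- inner while loop of A: (remaining chars, clean_text); stops at end of text or at "**"
def pA_inner (cs : List Char) (clean : List Char) : List Char × List Char :=
  if _h : cs ≠ [] ∧ cs.take 2 ≠ ['*', '*'] then
    pA_inner (cs.drop 1) (clean ++ cs.take 1)
  else (cs, clean)
termination_by cs.length
decreasing_by
  have := List.length_pos_iff.mpr _h.1
  simp only [List.length_drop]; omega

-- needed by pA_outer's termination proof
theorem pA_inner_fst_len (cs clean : List Char) : (pA_inner cs clean).1.length ≤ cs.length := by
  fun_induction pA_inner cs clean with
  | case1 cs clean h ih => simp only [List.length_drop] at ih; omega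
  | case2 cs clean h => simp

-- outer while loop of A
def pA_outer (cs clean : List Char) (spans : List (Int × Int)) : List Char × List (Int × Int) :=
  if _h : cs = [] then (clean, spans)
  else if cs.take 2 = ['*', '*'] then
    let start : Int := clean.length
    let r := pA_inner (cs.drop 2) clean
    pA_outer (r.1.drop 2) r.2 (spans ++ [(start, (r.2.length : Int))])
  else
    pA_outer (cs.drop 1) (clean ++ cs.take 1) spans
termination_by cs.length
decreasing_by
  · have h1 := pA_inner_fst_len (cs.drop 2) clean
    have := List.length_pos_iff.mpr _h
    simp only [List.length_drop] at *
    omega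
  · have := List.length_pos_iff.mpr _h
    simp only [List.length_drop]; omega

def parse_bold_spans (text : String) : String × (List (Int × Int)) :=
  let r := pA_outer text.toList [] []
  (String.mk r.1, r.2)

-- ===== PORT B =====
def parse_bold_spans_alt (text : String) : String × (List (Int × Int)) :=
  let parts := PySem.Chars.splitOn text.toList ['*', '*']
  let r := (PySem.List.enumerate parts).foldl
    (fun (st : List (List Char) × List (Int × Int) × Int) ip =>
      let spans' := if PySem.Int.mod ip.1 2 == 1
        then st.2.1 ++ [(st.2.2, st.2.2 + (ip.2.length : Int))] else st.2.1
      (st.1 ++ [ip.2], spans', st.2.2 + (ip.2.length : Int)))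
    ([], [], (0 : Int))
  (String.mk (PySem.Chars.join [] r.1), r.2.1)

-- ===== PRECONDITION & SPEC =====
def Spec_parse_bold_spans (text : String) (out : String × (List (Int × Int))) : Prop := out = parse_bold_spans_alt text
instance (text : String) (out : String × (List (Int × Int))) : Decidable (Spec_parse_bold_spans text out) := by unfold Spec_parse_bold_spans; infer_instance

-- ===== CLAIM (what is proved, stated in full; the proofs are below) =====
def Claim_equal_parse_bold_spans : Prop := ∀ (text : String), Dom_parse_bold_spans text → Spec_parse_bold_spans text (parse_bold_spans text)

-- ===== LEMMAS AND PROOFS =====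

-- reference form of split on "**" with an explicit current-piece accumulator (mirrors splitOn.go)
def mySplit (l cur : List Char) : List (List Char) :=
  if l.take 2 = ['*', '*'] then cur.reverse :: mySplit (l.drop 2) []
  else if _h : l = [] then [cur.reverse]
  else mySplit (l.drop 1) ((l.take 1).reverse ++ cur)
termination_by l.length
decreasing_by
  · rename_i ht
    have : l ≠ [] := by rintro rfl; simp at ht
    have := List.length_pos_iff.mpr this
    simp only [List.length_drop]; omega
  · have := List.length_pos_iff.mpr _h
    simp only [List.length_drop]; omega

-- parity-driven reference processing of the parts (b = current segment is inside ** **)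
def proc (b : Bool) (parts : List (List Char)) (pos : Int) : List Char × List (Int × Int) :=
  match parts with
  | [] => ([], [])
  | p :: ps =>
    let r := proc (!b) ps (pos + p.length)
    if b then (p ++ r.1, (pos, pos + (p.length : Int)) :: r.2) else (p ++ r.1, r.2)

theorem take2_iff (l : List Char) : List.isPrefixOf ['*','*'] l = true ↔ l.take 2 = ['*','*'] := by
  rcases l with _ | ⟨a, _ | ⟨b, r⟩⟩ <;> simp [List.isPrefixOf]
  constructor <;> rintro ⟨rfl, rfl⟩ <;> exact ⟨rfl, rfl⟩

theorem go_eq_mySplit : ∀ (fuel : Nat) (l cur : List Char) (acc : List (List Char)),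
    l.length < fuel →
    PySem.Chars.splitOn.go ['*', '*'] fuel l cur acc = acc.reverse ++ mySplit l cur := by
  intro fuel
  induction fuel with
  | zero => omega
  | succ f ih =>
    intro l cur acc hl
    match l with
    | [] =>
      rw [PySem.Chars.splitOn.go, mySplit]
      · simp
      · omega
    | c :: rest =>
      rw [PySem.Chars.splitOn.go]
      by_cases hp : List.isPrefixOf ['*','*'] (c :: rest)
      · have ht : (c :: rest).take 2 = ['*','*'] := (take2_iff _).mp hp
        conv_rhs => rw [mySplit, if_pos ht]
        rw [if_pos hp, ih _ _ _ (by simp at hl ⊢; omega)]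
        simp
      · have ht : ¬ (c :: rest).take 2 = ['*','*'] := fun h => hp ((take2_iff _).mpr h)
        conv_rhs => rw [mySplit, if_neg ht]
        rw [if_neg hp, ih _ _ _ (by simp at hl ⊢; omega)]
        simp

theorem splitOn_eq_mySplit (cs : List Char) :
    PySem.Chars.splitOn cs ['*', '*'] = mySplit cs [] := by
  rw [PySem.Chars.splitOn, go_eq_mySplit _ _ _ _ (by omega)]
  simp

theorem mySplit_ne_nil (l cur : List Char) : mySplit l cur ≠ [] := by
  fun_induction mySplit l cur <;> simp_all

theorem mySplit_cur (l : List Char) : ∀ cur, mySplit l cur =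
    (cur.reverse ++ (mySplit l []).headI) :: (mySplit l []).tail := by
  induction hn : l.length using Nat.strong_induction_on generalizing l with
  | _ n ih =>
    intro cur
    by_cases h2 : l.take 2 = ['*', '*']
    · conv_lhs => rw [mySplit]
      conv_rhs => rw [mySplit]
      simp [h2]
    · by_cases h0 : l = []
      · subst h0
        conv_lhs => rw [mySplit]
        conv_rhs => rw [mySplit]
        simp
      · have hlt : (l.drop 1).length < n := by
          have := List.length_pos_iff.mpr h0
          simp only [List.length_drop]; omega
        conv_lhs => rw [mySplit]
        conv_rhs => rw [mySplit]
        simp only [if_neg h2, dif_neg h0]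
        rw [ih _ hlt _ rfl ((l.take 1).reverse ++ cur), ih _ hlt _ rfl ((l.take 1).reverse ++ [])]
        simp

theorem inner_spec (cs clean : List Char) :
    (pA_inner cs clean).2 = clean ++ (mySplit cs []).headI ∧
    ∀ pos, proc false (mySplit ((pA_inner cs clean).1.drop 2) []) pos
         = proc false ((mySplit cs []).tail) pos := by
  fun_induction pA_inner cs clean with
  | case1 cs clean h ih =>
    have hm : mySplit cs [] = ((cs.take 1) ++ (mySplit (cs.drop 1) []).headI) :: (mySplit (cs.drop 1) []).tail := by
      rw [mySplit, if_neg h.2, dif_neg h.1, mySplit_cur]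
      simp
    obtain ⟨ih1, ih2⟩ := ih
    constructor
    · rw [ih1, hm]; simp
    · intro pos; rw [ih2, hm]; simp
  | case2 cs clean h =>
    rcases not_and_or.mp h with h0 | h2
    · have h0 : cs = [] := not_not.mp h0
      subst h0
      refine ⟨by rw [mySplit, mySplit]; simp, ?_⟩
      intro pos
      rw [mySplit]
      · simp [mySplit, proc]
    · have h2 : cs.take 2 = ['*', '*'] := not_not.mp h2
      rw [mySplit, if_pos h2]
      exact ⟨by simp, fun pos => rfl⟩

theorem main_lemma (cs clean : List Char) (spans : List (Int × Int)) :
    pA_outer cs clean spans =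
      (clean ++ (proc false (mySplit cs []) (clean.length : Int)).1,
       spans ++ (proc false (mySplit cs []) (clean.length : Int)).2) := by
  fun_induction pA_outer cs clean spans with
  | case1 clean spans =>
    conv_rhs => rw [mySplit]
    simp [proc]
  | case2 cs clean spans h ht start r ih =>
    have hr : r = pA_inner (cs.drop 2) clean := rfl
    have hs : start = (clean.length : Int) := rfl
    rw [hr, hs] at ih ⊢
    obtain ⟨hin1, hin2⟩ := inner_spec (cs.drop 2) clean
    obtain ⟨H, T, hHT⟩ : ∃ H T, mySplit (cs.drop 2) [] = H :: T := by
      rcases hm : mySplit (cs.drop 2) [] with _ | ⟨H, T⟩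
      · exact absurd hm (mySplit_ne_nil _ _)
      · exact ⟨H, T, rfl⟩
    have hsplit : mySplit cs [] = [] :: H :: T := by
      rw [mySplit, if_pos ht, hHT]
      simp
    have h2 : ∀ pos, proc false (mySplit ((pA_inner (cs.drop 2) clean).1.drop 2) []) pos = proc false T pos := by
      intro pos; rw [hin2 pos, hHT]; rfl
    rw [ih, hin1, hsplit, h2, hHT]
    simp [proc]
  | case3 cs clean spans h ht ih =>
    have hm : mySplit cs [] = ((cs.take 1) ++ (mySplit (cs.drop 1) []).headI) :: (mySplit (cs.drop 1) []).tail := by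
      rw [mySplit, if_neg ht, dif_neg h, mySplit_cur]
      simp
    obtain ⟨H, T, hHT⟩ : ∃ H T, mySplit (cs.drop 1) [] = H :: T := by
      rcases hq : mySplit (cs.drop 1) [] with _ | ⟨H, T⟩
      · exact absurd hq (mySplit_ne_nil _ _)
      · exact ⟨H, T, rfl⟩
    rw [ih, hm, hHT]
    have ht1 : cs.take 1 = [cs.head h] := by
      rcases cs with _ | ⟨c, r⟩
      · exact absurd rfl h
      · simp
    simp [proc, ht1]
    constructor
    · ring_nf
    · ring_nf

theorem proc_fst (parts : List (List Char)) : ∀ b pos, (proc b parts pos).1 = parts.flatten := by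
  induction parts with
  | nil => intro b pos; simp [proc]
  | cons p ps ih => intro b pos; cases b <;> simp [proc, ih]

theorem join_nil_sep (parts : List (List Char)) : PySem.Chars.join [] parts = parts.flatten := by
  induction parts with
  | nil => simp [PySem.Chars.join_nil]
  | cons p ps ih =>
    rcases ps with _ | ⟨q, r⟩
    · simp [PySem.Chars.join_singleton]
    · rw [PySem.Chars.join_cons_cons, ih]
      simp

theorem bfold (parts : List (List Char)) : ∀ (k : Nat) pieces spans (pos : Int),
    (PySem.List.enumerate parts (k : Int)).foldl
      (fun (st : List (List Char) × List (Int × Int) × Int) ip =>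
        let spans' := if PySem.Int.mod ip.1 2 == 1
          then st.2.1 ++ [(st.2.2, st.2.2 + (ip.2.length : Int))] else st.2.1
        (st.1 ++ [ip.2], spans', st.2.2 + (ip.2.length : Int)))
      (pieces, spans, pos)
    = (pieces ++ parts,
       spans ++ (proc (k % 2 == 1) parts pos).2,
       pos + ((parts.map List.length).sum : Int)) := by
  induction parts with
  | nil => intro k pieces spans pos; simp [PySem.List.enumerate, proc]
  | cons p ps ih =>
    intro k pieces spans pos
    have he : PySem.List.enumerate (p :: ps) (k : Int) = ((k : Int), p) :: PySem.List.enumerate ps (((k + 1 : Nat) : Int)) := by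
      simp [PySem.List.enumerate]
    rw [he, List.foldl_cons]
    have hmod : PySem.Int.mod (k : Int) 2 = ((k % 2 : Nat) : Int) := by
      exact_mod_cast PySem.Int.mod_natCast k 2
    by_cases hk : k % 2 = 1
    · have hb : (PySem.Int.mod (k : Int) 2 == 1) = true := by rw [hmod, hk]; rfl
      have hk1 : (k + 1) % 2 = 0 := by omega
      simp only [hb, if_true, ih (k + 1)]
      rw [hk1]
      simp [proc, hk]
      ring
    · have hb : (PySem.Int.mod (k : Int) 2 == 1) = false := by
        rw [hmod]
        have : k % 2 = 0 := by omega
        rw [this]; rfl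
      have hk1 : (k + 1) % 2 = 1 := by omega
      simp only [hb, ih (k + 1)]
      rw [hk1]
      have : k % 2 = 0 := by omega
      simp [proc, this]
      ring

-- ===== VERDICT (by name: the statement is the Claim_ definition above) =====
theorem parse_bold_spans_spec : Claim_equal_parse_bold_spans := by
  intro text _
  unfold Spec_parse_bold_spans parse_bold_spans parse_bold_spans_alt
  have hb := bfold (PySem.Chars.splitOn text.toList ['*', '*']) 0 [] [] 0
  simp only [Nat.cast_zero] at hb
  simp only [splitOn_eq_mySplit] at hb ⊢
  simp only [hb]
  have hm := main_lemma text.toList [] []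
  simp only [List.nil_append, List.length_nil, Nat.cast_zero] at hm
  simp only [hm]
  simp [join_nil_sep, proc_fst]
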